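-- pv_equiv track=rewrite | github.com/clebreto/jasmin-lsp | test/test_symbols/test_rename_symbol.py | find_position_of_text
-- ===== SOURCE A (Python) =====
-- def find_position_of_text(text, target, occurrence=1):
--     """Find line and character position of text"""
--     lines = text.split('\n')
--     count = 0
--     for line_num, line in enumerate(lines):
--         occurrences = []
--         start = 0
--         while True:
--             idx = line.find(target, start)
--             if idx == -1:
--                 break
--             occurrences.append(idx)
--             start = idx + 1
--
--         for char_pos in occurrences:
--             count += 1
--             if count == occurrence:
--                 return line_num, char_pos
--
--     return None
-- ===== SOURCE B (Python) =====
-- def find_position_of_text(text, target, occurrence=1):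
--     """Find line and character position of text"""
--     if '\n' in target:
--         return None  # a target spanning several lines never lies within one line
--     count = 0
--     line = 0
--     col = 0
--     for i in range(len(text) + 1):
--         if text.startswith(target, i):
--             count += 1
--             if count == occurrence:
--                 return line, col
--         if i < len(text):
--             if text[i] == '\n':
--                 line += 1
--                 col = 0
--             else:
--                 col += 1
--     return None
-- ===== Notes on version B (the rewrite author's own statement) =====
-- stated objective: alternative
-- what changed: B drops the split-into-lines outer loop and the per-line repeated find() inner loop; instead it makes one left-to-right pass over the whole text, testing startswith(target, i) at every offset while maintaining (line, col) counters, and returns the counters at the nth hit (targets containing a newline can never lie within one line, so they yield None up front).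
import Mathlib
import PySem

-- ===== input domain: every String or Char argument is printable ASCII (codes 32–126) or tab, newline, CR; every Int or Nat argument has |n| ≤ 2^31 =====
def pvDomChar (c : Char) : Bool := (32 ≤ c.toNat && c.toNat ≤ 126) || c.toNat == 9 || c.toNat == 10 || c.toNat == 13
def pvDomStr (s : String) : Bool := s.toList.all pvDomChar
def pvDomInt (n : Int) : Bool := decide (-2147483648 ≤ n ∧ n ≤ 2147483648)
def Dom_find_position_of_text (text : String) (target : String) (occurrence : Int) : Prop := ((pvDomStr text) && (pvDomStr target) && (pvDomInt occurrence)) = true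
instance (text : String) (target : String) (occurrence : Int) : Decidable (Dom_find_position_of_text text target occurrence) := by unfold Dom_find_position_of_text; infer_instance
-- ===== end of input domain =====

-- B replaces A's split-into-lines + per-line repeated find by a single left-to-right scan of the
-- whole text keeping (line, col) counters; objective: alternative decomposition, same return value.

-- ===== PORT A =====
-- termination fact for the inner `while True: idx = line.find(target, start)` loop
theorem findFrom_progress (line t : List Char) (start : Nat)
    (h : PySem.Chars.findFrom line t (start : Int) none ≠ -1) :
    start ≤ (PySem.Chars.findFrom line t (start : Int) none).toNat ∧
    (PySem.Chars.findFrom line t (start : Int) none).toNat ≤ line.length ∧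
    start ≤ line.length := by
  by_cases hk : start ≤ line.length
  · rw [PySem.Chars.findFrom_natCast line t start hk] at h ⊢
    have h1 := PySem.Chars.neg_one_le_find (line.drop start) t
    have h2 := PySem.Chars.find_le_length (line.drop start) t
    rw [List.length_drop] at h2
    by_cases hr : PySem.Chars.find (line.drop start) t = -1
    · simp [hr] at h
    · simp only [if_neg hr]
      refine ⟨?_, ?_, hk⟩ <;> omega
  · exfalso
    apply h
    simp only [PySem.Chars.findFrom]
    split <;> omega

-- `while True: idx = line.find(target, start); …; occurrences.append(idx); start = idx + 1`
def occLoop (line t : List Char) (start : Nat) : List Int :=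
  if h : PySem.Chars.findFrom line t (start : Int) none = -1 then []
  else
    PySem.Chars.findFrom line t (start : Int) none ::
      occLoop line t ((PySem.Chars.findFrom line t (start : Int) none).toNat + 1)
termination_by line.length + 1 - start
decreasing_by
  have := findFrom_progress line t start h
  omega

-- `for char_pos in occurrences: count += 1; if count == occurrence: return line_num, char_pos`
def forLoop (ln occ : Int) : Int → List Int → Sum Int (Int × Int)
  | count, [] => .inl count
  | count, c :: cs => if count + 1 = occ then .inr (ln, c) else forLoop ln occ (count + 1) cs

-- `for line_num, line in enumerate(lines): …`
def outerLoop (t : List Char) (occ : Int) : Int → List (Int × List Char) → Option (Int × Int)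
  | _, [] => none
  | count, (ln, line) :: rest =>
    match forLoop ln occ count (occLoop line t 0) with
    | .inr r => some r
    | .inl count' => outerLoop t occ count' rest

def find_position_of_text (text : String) (target : String) (occurrence : Int) : Option (Int × Int) :=
  outerLoop target.toList occurrence 0
    (PySem.List.enumerate (PySem.Chars.splitOn text.toList ['\n']) 0)

-- ===== PORT B =====
-- `for i in range(len(text) + 1): …` walking the suffix text[i:] with (line, col) counters
def bLoop (t : List Char) (occ : Int) (count ln col : Int) (s : List Char) : Option (Int × Int) :=
  let count' := if PySem.Chars.startswith s t then count + 1 else count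
  if PySem.Chars.startswith s t ∧ count' = occ then some (ln, col)
  else
    match s with
    | [] => none
    | c :: s' =>
      if c = '\n' then bLoop t occ count' (ln + 1) 0 s'
      else bLoop t occ count' ln (col + 1) s'
termination_by s.length

def find_position_of_text_alt (text : String) (target : String) (occurrence : Int) : Option (Int × Int) :=
  if PySem.Str.isIn "\n" target then none
  else bLoop target.toList occurrence 0 0 0 text.toList

-- ===== PRECONDITION & SPEC =====
def Spec_find_position_of_text (text : String) (target : String) (occurrence : Int) (out : Option (Int × Int)) : Prop := out = find_position_of_text_alt text target occurrence
instance (text : String) (target : String) (occurrence : Int) (out : Option (Int × Int)) : Decidable (Spec_find_position_of_text text target occurrence out) := by unfold Spec_find_position_of_text; infer_instance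

-- ===== CLAIM (what is proved, stated in full; the proofs are below) =====
def Claim_equal_find_position_of_text : Prop := ∀ (text : String) (target : String) (occurrence : Int), Dom_find_position_of_text text target occurrence → Spec_find_position_of_text text target occurrence (find_position_of_text text target occurrence)

-- ===== LEMMAS AND PROOFS =====

-- spec-side helpers (proof-only): the indices c with target a prefix of s.drop c (0 ≤ c ≤ s.length)
def posList (t s : List Char) : List Nat :=
  (List.range (s.length + 1)).filter (fun c => t.isPrefixOf (s.drop c))

-- 1-indexed extraction: the occ-th element counting on from count
def pick (occ : Int) : Int → List (Int × Int) → Option (Int × Int)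
  | _, [] => none
  | count, x :: xs => if count + 1 = occ then some x else pick occ (count + 1) xs

def listOf (t : List Char) (lines : List (Int × List Char)) : List (Int × Int) :=
  lines.flatMap (fun p => (posList t p.2).map (fun c => (p.1, Int.ofNat c)))

def specScan (t : List Char) (ln col : Int) (s : List Char) : List (Int × Int) :=
  (if PySem.Chars.startswith s t then [(ln, col)] else []) ++
  match s with
  | [] => []
  | c :: s' =>
    if c = '\n' then specScan t (ln + 1) 0 s' else specScan t ln (col + 1) s'
termination_by s.length

-- ---- A-side: outerLoop is pick over the flattened occurrence list ----

theorem pick_append (ln occ count : Int) (cs : List Int) (rest : List (Int × Int)) :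
    pick occ count (cs.map (fun c => (ln, c)) ++ rest) =
      match forLoop ln occ count cs with
      | .inr r => some r
      | .inl count' => pick occ count' rest := by
  induction cs generalizing count with
  | nil => simp [forLoop]
  | cons c cs ih =>
    simp only [List.map_cons, List.cons_append, pick, forLoop]
    split
    · rfl
    · exact ih (count + 1)

theorem outer_eq_pick (t : List Char) (occ : Int) (L : List (Int × List Char)) (count : Int) :
    outerLoop t occ count L =
      pick occ count (L.flatMap (fun p => (occLoop p.2 t 0).map (fun c => (p.1, c)))) := by
  induction L generalizing count with
  | nil => simp [outerLoop, pick]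
  | cons p L ih =>
    obtain ⟨ln, line⟩ := p
    simp only [outerLoop, List.flatMap_cons]
    rw [pick_append]
    cases forLoop ln occ count (occLoop line t 0) with
    | inr r => rfl
    | inl count' => exact ih count'

-- ---- occLoop is the filtered range of prefix positions ----

theorem no_prefix_of_findFrom_neg (line t : List Char) (start : Nat)
    (h : PySem.Chars.findFrom line t (start : Int) none = -1) :
    ∀ c, start ≤ c → c ≤ line.length → ¬ t.isPrefixOf (line.drop c) := by
  intro c hsc hcl hpre
  by_cases hk : start ≤ line.length
  · rw [PySem.Chars.findFrom_natCast_eq_neg_one_iff line t start hk] at h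
    apply h
    rw [List.isPrefixOf_iff_prefix] at hpre
    have hdd : line.drop c = (line.drop start).drop (c - start) := by
      rw [List.drop_drop]; congr 1; omega
    rw [hdd] at hpre
    exact hpre.isInfix.trans (List.drop_suffix _ _).isInfix
  · omega

theorem filter_range_empty (n a : Nat) (P : Nat → Bool)
    (h : ∀ c, a ≤ c → c < n → ¬ P c) :
    (List.range n).filter (fun c => a ≤ c && P c) = [] := by
  rw [List.filter_eq_nil_iff]
  intro c hc
  rw [List.mem_range] at hc
  by_cases hac : a ≤ c
  · simp [hac, h c hac hc]
  · simp [hac]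

theorem filter_range_head (n a b : Nat) (P : Nat → Bool)
    (hab : a ≤ b) (hbn : b < n) (hPb : P b)
    (hlt : ∀ i, a ≤ i → i < b → ¬ P i) :
    (List.range n).filter (fun c => a ≤ c && P c) =
      b :: (List.range n).filter (fun c => b + 1 ≤ c && P c) := by
  have hsplit : List.range n = List.range' 0 b ++ List.range' b (n - b) := by
    rw [List.range_eq_range', show n = b + (n - b) from by omega, ← List.range'_append]
    norm_num
  rw [hsplit, List.filter_append, List.filter_append]
  have h1 : (List.range' 0 b).filter (fun c => a ≤ c && P c) = [] := by
    rw [List.filter_eq_nil_iff]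
    intro c hc
    rw [List.mem_range'] at hc
    obtain ⟨i, hi, hci⟩ := hc
    by_cases hac : a ≤ c
    · have hcb : c < b := by omega
      simp [hac, hlt c hac hcb]
    · simp [hac]
  have h2 : (List.range' 0 b).filter (fun c => b + 1 ≤ c && P c) = [] := by
    rw [List.filter_eq_nil_iff]
    intro c hc
    rw [List.mem_range'] at hc
    obtain ⟨i, hi, hci⟩ := hc
    have hnb : ¬ (b + 1 ≤ c) := by omega
    simp [hnb]
  rw [h1, h2, List.nil_append, List.nil_append]
  rw [show n - b = (n - b - 1) + 1 from by omega, List.range'_succ]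
  simp only [List.filter_cons]
  have hc1 : (decide (a ≤ b) && P b) = true := by simp [hab, hPb]
  have hc2 : (decide (b + 1 ≤ b) && P b) = false := by simp
  rw [hc1, hc2]
  simp only [if_true]
  congr 1
  apply List.filter_congr
  intro c hc
  rw [List.mem_range'] at hc
  obtain ⟨i, hi, hci⟩ := hc
  have h3 : a ≤ c := by omega
  have h4 : b + 1 ≤ c := by omega
  simp [h3, h4]

theorem occLoop_eq (line t : List Char) (start : Nat) :
    occLoop line t start =
      ((List.range (line.length + 1)).filter
        (fun c => start ≤ c && t.isPrefixOf (line.drop c))).map Int.ofNat := by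
  induction start using occLoop.induct (line := line) (t := t) with
  | case1 start h =>
    rw [occLoop, dif_pos h]
    rw [filter_range_empty]
    · simp
    · intro c hac hcn
      exact no_prefix_of_findFrom_neg line t start h c hac (by omega)
  | case2 start h ih =>
    rw [occLoop, dif_neg h]
    obtain ⟨h1, h2, h3⟩ := findFrom_progress line t start h
    obtain ⟨hge, hpre, hfirst⟩ := PySem.Chars.findFrom_natCast_spec line t start h3 h
    rw [filter_range_head (line.length + 1) start
          (PySem.Chars.findFrom line t (start : Int) none).toNat _ h1 (by omega)
          (by rw [List.isPrefixOf_iff_prefix]; exact hpre)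
          (by intro i hai hib hP
              exact hfirst i hai hib (by rwa [List.isPrefixOf_iff_prefix] at hP))]
    rw [List.map_cons, ih]
    congr 1
    have h0 : 0 ≤ PySem.Chars.findFrom line t (start : Int) none :=
      le_trans (Int.natCast_nonneg start) hge
    exact (Int.toNat_of_nonneg h0).symm

theorem occLoop_zero (line t : List Char) :
    occLoop line t 0 = (posList t line).map Int.ofNat := by
  rw [occLoop_eq]
  unfold posList
  have h : ∀ c ∈ List.range (line.length + 1),
      (decide (0 ≤ c) && t.isPrefixOf (line.drop c)) = t.isPrefixOf (line.drop c) := by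
    intro c _; simp
  rw [List.filter_congr h]

-- ---- B-side: bLoop is pick over specScan ----

theorem bLoop_eq_pick (t : List Char) (occ : Int) (s : List Char) (count ln col : Int) :
    bLoop t occ count ln col s = pick occ count (specScan t ln col s) := by
  induction s generalizing count ln col with
  | nil =>
    rw [bLoop, specScan]
    by_cases hw : PySem.Chars.startswith [] t
    · by_cases hocc : count + 1 = occ <;> simp [hw, hocc, pick]
    · simp [hw, pick]
  | cons c s' ih =>
    rw [bLoop, specScan]
    by_cases hw : PySem.Chars.startswith (c :: s') t
    · by_cases hocc : count + 1 = occ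
      · simp [hw, hocc, pick]
      · by_cases hc : c = '\n'
        · subst hc; simp [hw, hocc, pick, ih]
        · simp [hw, hocc, hc, pick, ih]
    · by_cases hc : c = '\n'
      · subst hc; simp [hw, ih]
      · simp [hw, hc, ih]

-- ---- prefix facts ----

theorem prefix_append_nl_iff (t u v : List Char) (ht : '\n' ∉ t) :
    t.isPrefixOf (u ++ '\n' :: v) = t.isPrefixOf u := by
  have hiff : t <+: (u ++ '\n' :: v) ↔ t <+: u := by
    constructor
    · intro h
      by_cases hl : t.length ≤ u.length
      · rw [List.prefix_iff_eq_take] at h ⊢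
        rw [List.take_append] at h
        rw [show t.length - u.length = 0 from by omega, List.take_zero, List.append_nil] at h
        exact h
      · exfalso
        apply ht
        rw [List.prefix_iff_eq_take] at h
        rw [h, List.take_append,
          show t.length - u.length = (t.length - u.length - 1) + 1 from by omega,
          List.take_succ_cons]
        simp
    · intro h
      exact h.trans (List.prefix_append u ('\n' :: v))
  rw [Bool.eq_iff_iff]
  simpa [List.isPrefixOf_iff_prefix] using hiff

theorem posList_cons (t : List Char) (c : Char) (s : List Char) :
    posList t (c :: s) =
      (if t.isPrefixOf (c :: s) then [0] else []) ++ (posList t s).map (· + 1) := by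
  unfold posList
  rw [show (c :: s).length + 1 = (s.length + 1) + 1 from by simp]
  rw [List.range_succ_eq_map]
  have hmap : (((List.range (s.length + 1)).map Nat.succ).filter
        (fun k => t.isPrefixOf (List.drop k (c :: s)))) =
      ((List.range (s.length + 1)).filter (fun k => t.isPrefixOf (List.drop k s))).map (· + 1) := by
    rw [List.filter_map]
    congr 1
  by_cases hp : t.isPrefixOf (c :: s) <;>
    simp [hp, hmap]

-- ---- specScan over a single line ----

theorem scan_tail (t : List Char) (u : List Char) (hu : '\n' ∉ u) :
    ∀ ln col : Int,
      specScan t ln col u = (posList t u).map (fun c => (ln, col + Int.ofNat c)) := by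
  induction u with
  | nil =>
    intro ln col
    rw [specScan]
    unfold posList
    by_cases hp : t.isPrefixOf ([] : List Char) <;>
      simp [PySem.Chars.startswith, hp, List.range_succ]
  | cons c u' ih =>
    intro ln col
    have hc : c ≠ '\n' := fun h => hu (h ▸ List.mem_cons_self)
    have hu' : '\n' ∉ u' := fun h => hu (List.mem_cons_of_mem c h)
    rw [specScan, posList_cons]
    simp only [if_neg hc, ih hu' ln (col + 1), List.map_append, List.map_map]
    congr 1
    · by_cases hp : t.isPrefixOf (c :: u') <;>
        simp [PySem.Chars.startswith, hp]
    · congr 1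
      funext k
      simp only [Function.comp_apply]
      congr 1
      simp only [Int.ofNat_eq_natCast]
      push_cast
      omega

theorem scan_line (t : List Char) (ht : '\n' ∉ t) (u v : List Char) (hu : '\n' ∉ u) :
    ∀ ln col : Int,
      specScan t ln col (u ++ '\n' :: v) =
        (posList t u).map (fun c => (ln, col + Int.ofNat c)) ++ specScan t (ln + 1) 0 v := by
  induction u with
  | nil =>
    intro ln col
    rw [List.nil_append, specScan]
    unfold posList
    have hw : PySem.Chars.startswith ('\n' :: v) t = t.isPrefixOf ([] : List Char) := by
      have := prefix_append_nl_iff t [] v ht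
      simpa [PySem.Chars.startswith] using this
    rw [hw]
    by_cases hp : t.isPrefixOf ([] : List Char) <;>
      simp [hp, List.range_succ]
  | cons c u' ih =>
    intro ln col
    have hc : c ≠ '\n' := fun h => hu (h ▸ List.mem_cons_self)
    have hu' : '\n' ∉ u' := fun h => hu (List.mem_cons_of_mem c h)
    rw [List.cons_append, specScan, posList_cons]
    have hw : PySem.Chars.startswith (c :: (u' ++ '\n' :: v)) t = t.isPrefixOf (c :: u') := by
      have := prefix_append_nl_iff t (c :: u') v ht
      simpa [PySem.Chars.startswith] using this
    simp only [if_neg hc, hw, ih hu' ln (col + 1), List.map_append, List.map_map]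
    rw [List.append_assoc]
    congr 1
    · by_cases hp : t.isPrefixOf (c :: u') <;> simp [hp]
    · congr 2
      funext k
      simp only [Function.comp_apply]
      congr 1
      simp only [Int.ofNat_eq_natCast]
      push_cast
      omega

-- ---- structure of splitOn on '\n' ----

theorem go_nil (fuel : Nat) (cur : List Char) (acc : List (List Char)) :
    PySem.Chars.splitOn.go ['\n'] fuel [] cur acc = (cur.reverse :: acc).reverse := by
  cases fuel <;> simp [PySem.Chars.splitOn.go]

theorem go_cons_nl (fuel : Nat) (v cur : List Char) (acc : List (List Char)) :
    PySem.Chars.splitOn.go ['\n'] (fuel + 1) ('\n' :: v) cur acc =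
      PySem.Chars.splitOn.go ['\n'] fuel v [] (cur.reverse :: acc) := by
  simp [PySem.Chars.splitOn.go, List.isPrefixOf]

theorem go_cons_ne (fuel : Nat) (c : Char) (hc : c ≠ '\n') (v cur : List Char)
    (acc : List (List Char)) :
    PySem.Chars.splitOn.go ['\n'] (fuel + 1) (c :: v) cur acc =
      PySem.Chars.splitOn.go ['\n'] fuel v (c :: cur) acc := by
  simp [PySem.Chars.splitOn.go, List.isPrefixOf, hc.symm]

theorem go_skip_line (u : List Char) (hu : '\n' ∉ u) :
    ∀ (fuel : Nat) (l cur : List Char) (acc : List (List Char)), u.length ≤ fuel →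
      PySem.Chars.splitOn.go ['\n'] fuel (u ++ l) cur acc =
        PySem.Chars.splitOn.go ['\n'] (fuel - u.length) l (u.reverse ++ cur) acc := by
  induction u with
  | nil => intro fuel l cur acc _; simp
  | cons c u' ih =>
    intro fuel l cur acc hf
    have hc : c ≠ '\n' := fun h => hu (h ▸ List.mem_cons_self)
    have hu' : '\n' ∉ u' := fun h => hu (List.mem_cons_of_mem c h)
    obtain ⟨f, rfl⟩ : ∃ f, fuel = f + 1 := ⟨fuel - 1, by simp at hf ⊢; omega⟩
    rw [List.cons_append, go_cons_ne f c hc _ cur acc]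
    rw [ih hu' f l (c :: cur) acc (by simp at hf; omega)]
    congr 1
    · simp
    · simp

theorem go_acc (fuel : Nat) : ∀ (l cur : List Char) (acc : List (List Char)),
    PySem.Chars.splitOn.go ['\n'] fuel l cur acc =
      acc.reverse ++ PySem.Chars.splitOn.go ['\n'] fuel l cur [] := by
  induction fuel with
  | zero => intro l cur acc; simp [PySem.Chars.splitOn.go]
  | succ f ih =>
    intro l cur acc
    cases l with
    | nil => simp [go_nil]
    | cons c v =>
      by_cases hc : c = '\n'
      · subst hc
        rw [go_cons_nl, go_cons_nl, ih v [] (cur.reverse :: acc), ih v [] [cur.reverse]]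
        simp
      · rw [go_cons_ne f c hc, go_cons_ne f c hc, ih v (c :: cur) acc]

theorem splitOn_no_nl (u : List Char) (hu : '\n' ∉ u) :
    PySem.Chars.splitOn u ['\n'] = [u] := by
  unfold PySem.Chars.splitOn
  have h := go_skip_line u hu (u.length + 1) [] [] [] (by omega)
  simp only [List.append_nil] at h
  rw [h, show u.length + 1 - u.length = 1 from by omega, go_nil]
  simp

theorem splitOn_cons (u v : List Char) (hu : '\n' ∉ u) :
    PySem.Chars.splitOn (u ++ '\n' :: v) ['\n'] = u :: PySem.Chars.splitOn v ['\n'] := by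
  unfold PySem.Chars.splitOn
  rw [go_skip_line u hu _ _ [] [] (by simp; omega)]
  have hlen : (u ++ '\n' :: v).length + 1 - u.length = v.length + 1 + 1 := by simp; omega
  rw [hlen, go_cons_nl, go_acc]
  simp

-- ---- decomposing a string at its first newline ----

theorem first_nl_decomp (s : List Char) (h : '\n' ∈ s) :
    ∃ u v, s = u ++ '\n' :: v ∧ '\n' ∉ u := by
  induction s with
  | nil => cases h
  | cons c s' ih =>
    by_cases hc : c = '\n'
    · exact ⟨[], s', by simp [hc], by simp⟩
    · have h' : '\n' ∈ s' := by
        cases List.mem_cons.mp h with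
        | inl hh => exact absurd hh.symm hc
        | inr hh => exact hh
      obtain ⟨u, v, huv, hu⟩ := ih h'
      refine ⟨c :: u, v, by simp [huv], ?_⟩
      intro hm
      rcases List.mem_cons.mp hm with hh | hh
      · exact hc hh.symm
      · exact hu hh

theorem scan_split (t : List Char) (ht : '\n' ∉ t) :
    ∀ (n : Nat) (s : List Char), s.length ≤ n → ∀ ln : Int,
      specScan t ln 0 s =
        listOf t (PySem.List.enumerate (PySem.Chars.splitOn s ['\n']) ln) := by
  intro n
  induction n with
  | zero =>
    intro s hs ln
    have : s = [] := List.length_eq_zero_iff.mp (by omega)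
    subst this
    rw [scan_tail t [] (by simp) ln 0, splitOn_no_nl [] (by simp)]
    simp [listOf, PySem.List.enumerate]
  | succ n ih =>
    intro s hs ln
    by_cases hnl : '\n' ∈ s
    · obtain ⟨u, v, rfl, hu⟩ := first_nl_decomp s hnl
      rw [scan_line t ht u v hu ln 0, splitOn_cons u v hu]
      rw [PySem.List.enumerate_cons]
      have hv : v.length ≤ n := by simp at hs; omega
      rw [ih v hv (ln + 1)]
      simp [listOf]
    · rw [scan_tail t s hnl ln 0, splitOn_no_nl s hnl]
      simp [listOf, PySem.List.enumerate]

-- ---- the newline-in-target case ----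

theorem mem_splitOn_no_nl (s : List Char) :
    ∀ (n : Nat), s.length ≤ n → ∀ l, l ∈ PySem.Chars.splitOn s ['\n'] → '\n' ∉ l := by
  intro n
  induction n generalizing s with
  | zero =>
    intro hs l hl
    have : s = [] := List.length_eq_zero_iff.mp (by omega)
    subst this
    rw [splitOn_no_nl [] (by simp)] at hl
    simp at hl
    simp [hl]
  | succ n ih =>
    intro hs l hl
    by_cases hnl : '\n' ∈ s
    · obtain ⟨u, v, rfl, hu⟩ := first_nl_decomp s hnl
      rw [splitOn_cons u v hu] at hl
      cases List.mem_cons.mp hl with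
      | inl h => exact h ▸ hu
      | inr h => exact ih v (by simp at hs; omega) l h
    · rw [splitOn_no_nl s hnl] at hl
      simp at hl
      exact hl ▸ hnl

theorem posList_nil_of_nl_mem (t l : List Char) (hnl : '\n' ∈ t) (hl : '\n' ∉ l) :
    posList t l = [] := by
  unfold posList
  rw [List.filter_eq_nil_iff]
  intro c _ hpre
  rw [List.isPrefixOf_iff_prefix] at hpre
  exact hl (List.drop_subset c l (hpre.subset hnl))

theorem singleton_infix_iff (l : List Char) : ['\n'] <:+: l ↔ '\n' ∈ l := by
  constructor
  · intro h
    exact h.subset List.mem_cons_self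
  · intro h
    obtain ⟨p, q, rfl⟩ := List.append_of_mem h
    exact ⟨p, q, by simp⟩

-- ===== VERDICT (by name: the statement is the Claim_ definition above) =====
theorem find_position_of_text_spec : Claim_equal_find_position_of_text := by
  intro text target occurrence _
  unfold Spec_find_position_of_text
  unfold find_position_of_text find_position_of_text_alt
  rw [outer_eq_pick]
  by_cases hnl : '\n' ∈ target.toList
  · rw [if_pos ((PySem.Str.isIn_iff_infix "\n" target).mpr ((singleton_infix_iff target.toList).mpr
      (by simpa using hnl)))]
    have hflat : (PySem.List.enumerate (PySem.Chars.splitOn text.toList ['\n']) 0).flatMap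
        (fun p => (occLoop p.2 target.toList 0).map (fun c => (p.1, c))) = [] := by
      rw [List.flatMap_eq_nil_iff]
      intro p hp
      have hp2 : p.2 ∈ PySem.Chars.splitOn text.toList ['\n'] := by
        obtain ⟨k, hk, rfl⟩ := (PySem.List.mem_enumerate_iff _ _ _).mp hp
        exact List.getElem_mem hk
      rw [occLoop_zero, posList_nil_of_nl_mem target.toList p.2 hnl
        (mem_splitOn_no_nl text.toList text.toList.length le_rfl p.2 hp2)]
      simp
    rw [hflat]
    rfl
  · rw [if_neg (fun hin => hnl (by
      have := (singleton_infix_iff target.toList).mp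
        (by simpa using (PySem.Str.isIn_iff_infix "\n" target).mp hin)
      exact this))]
    rw [bLoop_eq_pick, scan_split target.toList hnl text.toList.length text.toList le_rfl 0]
    congr 1
    unfold listOf
    apply List.flatMap_congr
    intro p hp
    rw [occLoop_zero, List.map_map]
    rfl
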